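-- pv_equiv track=rewrite | github.com/avm5998/adventofcode2023 | gearratios.py | checkleftp2
-- ===== SOURCE A (Python) =====
-- def checkleftp2(i, j, lines):
--     k = j-1
--     number = 0
--     mult_term = 1
--     while k >= 0 and lines[i][k].isdigit():
--         number += mult_term*int(lines[i][k])
--         mult_term *= 10
--         k -= 1
--     if k==j-1: return 0,0
--     k += 1
--     return number,1
-- ===== SOURCE B (Python) =====
-- def checkleftp2(i, j, lines):
--     if j < 1:
--         return (0, 0)
--     run = []
--     for ch in reversed(lines[i][:j]):
--         if not ch.isdigit():
--             break
--         run.append(ch)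
--     if not run:
--         return (0, 0)
--     value = 0
--     for ch in reversed(run):
--         value = value * 10 + int(ch)
--     return (value, 1)
-- ===== Notes on version B (the rewrite author's own statement) =====
-- stated objective: alternative
-- what changed: B splits the work into two phases -- collect the contiguous digit run by iterating over the reversed prefix lines[i][:j] (no index arithmetic), then parse it with a left-to-right Horner fold -- instead of A's single index-decrementing loop that accumulates digit*mult_term with a growing power-of-ten multiplier.
import Mathlib
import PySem

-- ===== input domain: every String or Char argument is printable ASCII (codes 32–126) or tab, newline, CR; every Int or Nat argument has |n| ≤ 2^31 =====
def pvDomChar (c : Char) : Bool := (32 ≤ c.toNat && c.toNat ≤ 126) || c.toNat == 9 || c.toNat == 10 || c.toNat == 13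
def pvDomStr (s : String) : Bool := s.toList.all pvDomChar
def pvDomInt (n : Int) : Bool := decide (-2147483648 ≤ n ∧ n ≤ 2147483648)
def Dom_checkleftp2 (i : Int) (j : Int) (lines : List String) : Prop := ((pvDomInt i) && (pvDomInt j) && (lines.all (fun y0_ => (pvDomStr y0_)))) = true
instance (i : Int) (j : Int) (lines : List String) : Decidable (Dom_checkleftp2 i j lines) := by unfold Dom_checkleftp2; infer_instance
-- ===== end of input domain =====

-- B restates the task as boundary-finding over the reversed prefix followed by a
-- left-to-right Horner parse, instead of A's fused index loop with a growing
-- power-of-ten multiplier; equal cost, different decomposition ("alternative").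

-- ===== PORT A =====
-- A's while loop: k decrements from j-1 while lines[i][k] is a digit,
-- accumulating number += mult_term*int(lines[i][k]); fuel = j.toNat bounds the
-- iteration count (the guard k >= 0 exits exactly when fuel would).
def checkleftp2_loop (row : List Char) : Nat → Int → Int → Int → Int × Int
  | 0, k, number, _ => (k, number)
  | fuel+1, k, number, mult_term =>
    if k ≥ 0 ∧ ((PySem.List.pyGet? row k).map PySem.Chars.isdigit).getD false = true then
      checkleftp2_loop row fuel (k-1)
        (number + mult_term * (PySem.Int.ofChars? [(PySem.List.pyGet? row k).getD ' ']).getD 0)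
        (mult_term * 10)
    else (k, number)

def checkleftp2 (i : Int) (j : Int) (lines : List String) : Int × Int :=
  let row := ((PySem.List.pyGet? lines i).getD "").toList
  let r := checkleftp2_loop row j.toNat (j-1) 0 1
  if r.1 = j - 1 then (0, 0) else (r.2, 1)

-- ===== PORT B =====
-- the for-loop over reversed(lines[i][:j]) collecting the digit run (break on non-digit)
def checkleftp2_run (cs : List Char) (run : List Char) : List Char :=
  match cs with
  | [] => run
  | c :: rest => if PySem.Chars.isdigit c then checkleftp2_run rest (run ++ [c]) else run

-- the for-loop over reversed(run): value = value*10 + int(ch)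
def checkleftp2_val (cs : List Char) (value : Int) : Int :=
  match cs with
  | [] => value
  | c :: rest => checkleftp2_val rest (value * 10 + (PySem.Int.ofChars? [c]).getD 0)

def checkleftp2_alt (i : Int) (j : Int) (lines : List String) : Int × Int :=
  if j < 1 then (0, 0)
  else
    let row := ((PySem.List.pyGet? lines i).getD "").toList
    let run := checkleftp2_run (PySem.List.slice row none (some j)).reverse []
    if run = [] then (0, 0)
    else (checkleftp2_val run.reverse 0, 1)

-- ===== PRECONDITION & SPEC =====
-- Pre_ excludes exactly the inputs where A raises an IndexError: j ≥ 1 with i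
-- out of range for lines, or j-1 out of range for lines[i].
def Pre_checkleftp2 (i : Int) (j : Int) (lines : List String) : Prop :=
  1 ≤ j → ((PySem.List.pyGet? lines i).isSome = true ∧
           j ≤ PySem.Str.len ((PySem.List.pyGet? lines i).getD ""))
instance (i : Int) (j : Int) (lines : List String) : Decidable (Pre_checkleftp2 i j lines) := by
  unfold Pre_checkleftp2; infer_instance

def pvWitness_checkleftp2 : Int × Int × List String := (0, 3, ["a12"])

def Spec_checkleftp2 (i : Int) (j : Int) (lines : List String) (out : Int × Int) : Prop := out = checkleftp2_alt i j lines
instance (i : Int) (j : Int) (lines : List String) (out : Int × Int) : Decidable (Spec_checkleftp2 i j lines out) := by unfold Spec_checkleftp2; infer_instance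

-- ===== CLAIM (what is proved, stated in full; the proofs are below) =====
def Claim_equal_checkleftp2 : Prop := ∀ (i : Int) (j : Int) (lines : List String), Dom_checkleftp2 i j lines → Pre_checkleftp2 i j lines → Spec_checkleftp2 i j lines (checkleftp2 i j lines)

-- ===== LEMMAS AND PROOFS =====

-- digit value of a single character, as both ports compute it
def pvD (c : Char) : Int := (PySem.Int.ofChars? [c]).getD 0

-- little-endian value of a digit run (first char = least significant)
def pvV : List Char → Int
  | [] => 0
  | c :: cs => pvD c + 10 * pvV cs

theorem checkleftp2_run_eq (cs run : List Char) :
    checkleftp2_run cs run = run ++ cs.takeWhile PySem.Chars.isdigit := by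
  induction cs generalizing run with
  | nil => simp [checkleftp2_run]
  | cons c rest ih =>
    simp only [checkleftp2_run, List.takeWhile]
    by_cases h : PySem.Chars.isdigit c
    · simp [h, ih]
    · simp [h]

theorem checkleftp2_val_append (xs : List Char) (c : Char) (v : Int) :
    checkleftp2_val (xs ++ [c]) v = checkleftp2_val xs v * 10 + pvD c := by
  induction xs generalizing v with
  | nil => simp [checkleftp2_val, pvD]
  | cons x rest ih => simp [checkleftp2_val, ih]

theorem checkleftp2_val_reverse (l : List Char) :
    checkleftp2_val l.reverse 0 = pvV l := by
  induction l with
  | nil => simp [checkleftp2_val, pvV]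
  | cons c cs ih =>
    simp only [List.reverse_cons, checkleftp2_val_append, ih, pvV]
    ring

theorem checkleftp2_loop_eq (row : List Char) (m : Nat) (hm : m ≤ row.length)
    (num mult : Int) :
    checkleftp2_loop row m ((m : Int) - 1) num mult =
      ((m : Int) - 1 - ((row.take m).reverse.takeWhile PySem.Chars.isdigit).length,
       num + mult * pvV ((row.take m).reverse.takeWhile PySem.Chars.isdigit)) := by
  induction m generalizing num mult with
  | zero => simp [checkleftp2_loop, pvV]
  | succ m ih =>
    have hlt : m < row.length := by omega
    have htake : (row.take (m+1)).reverse = row[m] :: (row.take m).reverse := by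
      rw [List.take_add_one]
      simp [List.getElem?_eq_getElem hlt]
    have hget : PySem.List.pyGet? row ((m : Int) + 1 - 1) = some row[m] := by
      have : (m : Int) + 1 - 1 = (m : Int) := by ring
      rw [this, PySem.List.pyGet?_natCast, List.getElem?_eq_getElem hlt]
    simp only [checkleftp2_loop, Nat.cast_add, Nat.cast_one, hget, Option.map_some,
      Option.getD_some, htake, List.takeWhile]
    by_cases hd : PySem.Chars.isdigit row[m]
    · have hk : (0:Int) ≤ (m:Int) := by positivity
      rw [if_pos ⟨by omega, hd⟩]
      have : (m : Int) + 1 - 1 - 1 = (m : Int) - 1 := by ring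
      rw [this, ih (by omega)]
      simp only [hd, pvV, List.length_cons]
      rw [Prod.mk.injEq]
      exact ⟨by push_cast; ring, by simp only [pvD]; ring⟩
    · rw [if_neg (by simp [hd])]
      simp [hd, pvV]

theorem checkleftp2_main (i : Int) (j : Int) (lines : List String)
    (hpre : Pre_checkleftp2 i j lines) :
    checkleftp2 i j lines = checkleftp2_alt i j lines := by
  by_cases hj : j < 1
  · have h0 : j.toNat = 0 := by omega
    simp [checkleftp2, checkleftp2_alt, h0, checkleftp2_loop, hj]
  · have hj1 : 1 ≤ j := by omega
    obtain ⟨-, hlen⟩ := hpre hj1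
    set row := ((PySem.List.pyGet? lines i).getD "").toList with hrow
    have hlen' : j ≤ (row.length : Int) := by
      rw [PySem.Str.len_eq] at hlen; exact hlen
    have hmle : j.toNat ≤ row.length := by omega
    have hcast : ((j.toNat : Int)) = j := by omega
    set run := (row.take j.toNat).reverse.takeWhile PySem.Chars.isdigit with hrun
    have hloop := checkleftp2_loop_eq row j.toNat hmle 0 1
    rw [hcast] at hloop
    have hslice : PySem.List.slice row none (some j) = row.take j.toNat :=
      PySem.List.slice_to row (by omega)
    have halt : checkleftp2_alt i j lines =
        if run = [] then (0, 0) else (checkleftp2_val run.reverse 0, 1) := by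
      simp only [checkleftp2_alt, if_neg hj, ← hrow, hslice,
        checkleftp2_run_eq, List.nil_append, ← hrun]
    rw [halt]
    simp only [checkleftp2, ← hrow, hloop, ← hrun]
    by_cases hruncase : run = []
    · simp [hruncase]
    · have hne : run.length ≠ 0 := by simpa using hruncase
      rw [if_neg (by omega), if_neg hruncase, checkleftp2_val_reverse]
      simp

-- ===== VERDICT (by name: the statement is the Claim_ definition above) =====
theorem checkleftp2_spec : Claim_equal_checkleftp2 := by
  intro i j lines _ hpre
  unfold Spec_checkleftp2
  exact checkleftp2_main i j lines hpre
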